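-- pv_equiv track=rewrite | github.com/DarkMaguz/CP-Python | challenges/dmca.py | BuildHashTable
-- ===== SOURCE A (Python) =====
-- import math as Math
--
-- HASH_TABLE_SIZE = 256
--
-- def BuildHashTable(password: str):
--   charTable = [ i for i in range(HASH_TABLE_SIZE) ]
--   hashTable = [ 0 for _ in range(HASH_TABLE_SIZE) ]
--   for i in range(HASH_TABLE_SIZE):
--       unit = (ord(password[i % len(password)]) * (Math.floor(i / len(password)) + 1)) % len(charTable)
--       hashTable[i] = charTable[unit]
--       del charTable[unit]
--   return hashTable
-- ===== SOURCE B (Python) =====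
-- def BuildHashTable(password: str):
--   n = len(password)
--   flags = [True] * 256          # flags[v] == v not yet consumed
--   hashTable = []
--   for i in range(256):
--     remaining = 256 - i
--     unit = (ord(password[i % n]) * (i // n + 1)) % remaining
--     # walk the bitmap to the unit-th still-present value
--     j = 0
--     k = unit
--     while not flags[j] or k > 0:
--       if flags[j]:
--         k -= 1
--       j += 1
--     flags[j] = False
--     hashTable.append(j)
--   return hashTable
-- ===== Notes on version B (the rewrite author's own statement) =====
-- stated objective: alternative
-- what changed: Replaces the shrinking charTable list (indexing + del with element shifting) by a fixed 256-slot presence bitmap with an order-statistics scan for the unit-th still-present value, and builds the result by appending instead of index assignment; Pre_ only excludes the empty password, on which both raise ZeroDivisionError.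
import Mathlib
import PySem

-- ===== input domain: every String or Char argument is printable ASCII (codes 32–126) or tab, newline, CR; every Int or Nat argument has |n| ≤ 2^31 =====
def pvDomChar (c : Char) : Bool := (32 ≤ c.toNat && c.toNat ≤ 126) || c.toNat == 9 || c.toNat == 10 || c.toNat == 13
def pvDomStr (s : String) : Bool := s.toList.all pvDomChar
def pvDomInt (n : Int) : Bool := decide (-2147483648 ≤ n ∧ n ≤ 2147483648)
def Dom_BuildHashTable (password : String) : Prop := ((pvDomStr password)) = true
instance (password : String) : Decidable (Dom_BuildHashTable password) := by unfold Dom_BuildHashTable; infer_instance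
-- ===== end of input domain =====

set_option maxRecDepth 4000

-- B replaces A's shrinking charTable list (index + del) by a fixed presence bitmap
-- with an order-statistics scan, appending results instead of index assignment (alternative, same cost).

-- the unit expression shared verbatim by both Pythons: (ord(password[i % len]) * (i // len + 1)) % r
-- (Math.floor(i / len) ported as Nat division and i % len as Nat mod, exact since operands are
--  nonnegative; the character lookup is in range for nonempty password, so getD's default is unreachable)
def pvUnit (password : String) (i : Nat) (r : Int) : Nat :=
  (PySem.Int.mod (((password.toList.getD (i % password.length) ' ').toNat : Int) *
    (((i / password.length : Nat) : Int) + 1)) r).toNat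

-- ===== PORT A =====
-- one loop iteration of A: pick charTable[unit], write it at slot i, delete it
-- (getD 0 is in range because unit < len(charTable) always, so Python never raises IndexError)
def pvStepA (password : String) (st : List Int × List Int) (i : Nat) : List Int × List Int :=
  let charTable := st.1
  let unit := pvUnit password i (charTable.length : Int)
  (charTable.eraseIdx unit, st.2.set i (charTable.getD unit 0))

def BuildHashTable (password : String) : List Int :=
  let charTable : List Int := (List.range 256).map (fun j => (j : Int))
  let hashTable : List Int := List.replicate 256 (0 : Int)
  ((List.range 256).foldl (pvStepA password) (charTable, hashTable)).2

-- ===== PORT B =====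
-- scan the bitmap for the k-th set flag: returns its position and the bitmap with it cleared
-- (recursive form of Source B's while loop; 'none' only when k ≥ number of set flags, never reached)
def pvSelect : List Bool → Nat → Option (Nat × List Bool)
  | [], _ => none
  | true :: t, 0 => some (0, false :: t)
  | true :: t, k + 1 => (pvSelect t k).map (fun p => (p.1 + 1, true :: p.2))
  | false :: t, k => (pvSelect t k).map (fun p => (p.1 + 1, false :: p.2))

def pvStepB (password : String) (st : List Bool × List Int) (i : Nat) : List Bool × List Int :=
  match pvSelect st.1 (pvUnit password i (256 - (i : Int))) with
  | some (j, flags') => (flags', st.2 ++ [(j : Int)])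
  | none => st

def BuildHashTable_alt (password : String) : List Int :=
  ((List.range 256).foldl (pvStepB password) (List.replicate 256 true, [])).2

-- ===== PRECONDITION & SPEC =====
-- Pre_ excludes exactly the empty password, on which A raises ZeroDivisionError (len(password) = 0).
def Pre_BuildHashTable (password : String) : Prop := password ≠ ""
instance (password : String) : Decidable (Pre_BuildHashTable password) := by unfold Pre_BuildHashTable; infer_instance
def pvWitness_BuildHashTable : String := "a"

def Spec_BuildHashTable (password : String) (out : List Int) : Prop := out = BuildHashTable_alt password
instance (password : String) (out : List Int) : Decidable (Spec_BuildHashTable password out) := by unfold Spec_BuildHashTable; infer_instance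

-- ===== CLAIM (what is proved, stated in full; the proofs are below) =====
def Claim_equal_BuildHashTable : Prop := ∀ (password : String), Dom_BuildHashTable password → Pre_BuildHashTable password → Spec_BuildHashTable password (BuildHashTable password)

-- ===== LEMMAS AND PROOFS =====

-- the increasing list of positions of set flags, offset by n (the abstraction of A's charTable)
def pvIdxs : List Bool → Int → List Int
  | [], _ => []
  | true :: t, n => n :: pvIdxs t (n + 1)
  | false :: t, n => pvIdxs t (n + 1)

theorem pvIdxs_length : ∀ (fl : List Bool) (n : Int), (pvIdxs fl n).length = fl.count true := by
  intro fl
  induction fl with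
  | nil => intro n; simp [pvIdxs]
  | cons b t ih =>
    intro n
    cases b <;> simp [pvIdxs, ih]

theorem pvSelect_spec : ∀ (fl : List Bool) (k : Nat), k < fl.count true →
    ∃ j f', pvSelect fl k = some (j, f') ∧
      (∀ n : Int, (pvIdxs fl n).getD k 0 = n + (j : Int) ∧
        pvIdxs f' n = (pvIdxs fl n).eraseIdx k) := by
  intro fl
  induction fl with
  | nil => intro k hk; simp at hk
  | cons b t ih =>
    intro k hk
    cases b with
    | true =>
      cases k with
      | zero =>
        exact ⟨0, false :: t, rfl, by intro n; simp [pvIdxs]⟩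
      | succ k =>
        have hk' : k < t.count true := by simpa [List.count_cons] using hk
        obtain ⟨j, f', hsel, hprop⟩ := ih k hk'
        refine ⟨j + 1, true :: f', by simp [pvSelect, hsel], ?_⟩
        intro n
        obtain ⟨h1, h2⟩ := hprop (n + 1)
        refine ⟨?_, ?_⟩
        · show (pvIdxs t (n + 1)).getD k 0 = n + ((j + 1 : Nat) : Int)
          rw [h1]; push_cast; ring
        · show pvIdxs (true :: f') n = (pvIdxs (true :: t) n).eraseIdx (k + 1)
          simp only [pvIdxs, List.eraseIdx_cons_succ, h2]
    | false =>
      have hk' : k < t.count true := by simpa [List.count_cons] using hk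
      obtain ⟨j, f', hsel, hprop⟩ := ih k hk'
      refine ⟨j + 1, false :: f', by simp [pvSelect, hsel], ?_⟩
      intro n
      obtain ⟨h1, h2⟩ := hprop (n + 1)
      refine ⟨?_, ?_⟩
      · show (pvIdxs t (n + 1)).getD k 0 = n + ((j + 1 : Nat) : Int)
        rw [h1]; push_cast; ring
      · show pvIdxs (false :: f') n = (pvIdxs (false :: t) n).eraseIdx k
        simp only [pvIdxs, h2]

theorem pvIdxs_replicate : ∀ (m : Nat) (n : Int),
    pvIdxs (List.replicate m true) n = (List.range m).map (fun j : Nat => n + (j : Int)) := by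
  intro m
  induction m with
  | zero => intro n; simp [pvIdxs]
  | succ m ih =>
    intro n
    rw [List.replicate_succ, List.range_succ_eq_map]
    simp only [pvIdxs, ih (n + 1), List.map_cons, List.map_map]
    refine congrArg₂ List.cons (by simp) ?_
    apply List.map_congr_left
    intro j _
    show n + 1 + (j : Int) = n + ((j.succ : Nat) : Int)
    push_cast; ring

-- setting the slot just past a prefix replaces the head of the suffix
theorem pvSet_append : ∀ (l1 : List Int) (v0 v : Int) (r : List Int),
    (l1 ++ v0 :: r).set l1.length v = l1 ++ v :: r := by
  intro l1
  induction l1 with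
  | nil => intro v0 v r; rfl
  | cons x t ih => intro v0 v r; simp [ih]

-- the simulation invariant between A's state and B's state after a iterations
def pvRel (a : Nat) (sA : List Int × List Int) (sB : List Bool × List Int) : Prop :=
  sA.1 = pvIdxs sB.1 0 ∧ sA.1.length = 256 - a ∧
  sA.2 = sB.2 ++ List.replicate (256 - a) (0 : Int) ∧ sB.2.length = a

theorem pvStep_sim (password : String) (a : Nat) (ha : a < 256)
    (sA : List Int × List Int) (sB : List Bool × List Int) (h : pvRel a sA sB) :
    pvRel (a + 1) (pvStepA password sA a) (pvStepB password sB a) := by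
  obtain ⟨hct, hlen, hhash, houtlen⟩ := h
  have hrem : ((sA.1.length : Nat) : Int) = 256 - (a : Int) := by rw [hlen]; omega
  have hpos : (0 : Int) < 256 - (a : Int) := by omega
  set u := pvUnit password a (256 - (a : Int)) with hu
  have hb1 := PySem.Int.mod_nonneg (((password.toList.getD (a % password.length) ' ').toNat : Int) *
    (((a / password.length : Nat) : Int) + 1)) hpos
  have hb2 := PySem.Int.mod_lt (((password.toList.getD (a % password.length) ' ').toNat : Int) *
    (((a / password.length : Nat) : Int) + 1)) hpos
  have hult : u < 256 - a := by rw [hu]; unfold pvUnit; omega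
  have hulen : u < sA.1.length := by omega
  have hcount : u < sB.1.count true := by
    have hc := congrArg List.length hct
    rw [pvIdxs_length] at hc
    omega
  obtain ⟨j, f', hsel, hprop⟩ := pvSelect_spec sB.1 u hcount
  obtain ⟨hval, herase⟩ := hprop 0
  have hval' : sA.1.getD u 0 = (j : Int) := by rw [hct, hval]; ring
  have hB : pvStepB password sB a = (f', sB.2 ++ [(j : Int)]) := by
    simp only [pvStepB, ← hu, hsel]
  have hA : pvStepA password sA a = (sA.1.eraseIdx u, sA.2.set a ((j : Int))) := by
    simp only [pvStepA, hrem, ← hu, hval']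
  rw [hA, hB]
  refine ⟨?_, ?_, ?_, ?_⟩
  · show sA.1.eraseIdx u = pvIdxs f' 0
    rw [herase, hct]
  · show (sA.1.eraseIdx u).length = 256 - (a + 1)
    rw [List.length_eraseIdx_of_lt hulen, hlen]; omega
  · show sA.2.set a (j : Int) = (sB.2 ++ [(j : Int)]) ++ List.replicate (256 - (a + 1)) 0
    rw [hhash]
    have h256 : 256 - a = (256 - (a + 1)) + 1 := by omega
    rw [h256, List.replicate_succ, ← houtlen, pvSet_append]
    simp
  · show (sB.2 ++ [(j : Int)]).length = a + 1
    simp [houtlen]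

theorem pvFold_sim (password : String) : ∀ (m a : Nat), a + m ≤ 256 →
    ∀ sA sB, pvRel a sA sB →
    pvRel (a + m) ((List.range' a m).foldl (pvStepA password) sA)
      ((List.range' a m).foldl (pvStepB password) sB) := by
  intro m
  induction m with
  | zero => intro a _ sA sB h; simpa using h
  | succ m ih =>
    intro a hle sA sB h
    rw [List.range'_succ]
    simp only [List.foldl_cons]
    have hstep := pvStep_sim password a (by omega) sA sB h
    have hrest := ih (a + 1) (by omega) _ _ hstep
    have harr : a + 1 + m = a + (m + 1) := by omega
    rwa [harr] at hrest

-- ===== VERDICT (by name: the statement is the Claim_ definition above) =====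
theorem BuildHashTable_spec : Claim_equal_BuildHashTable := by
  intro password _ _
  show BuildHashTable password = BuildHashTable_alt password
  unfold BuildHashTable BuildHashTable_alt
  have hinit : pvRel 0 ((List.range 256).map (fun j => (j : Int)), List.replicate 256 (0 : Int))
      (List.replicate 256 true, ([] : List Int)) := by
    refine ⟨?_, by simp, by simp, rfl⟩
    rw [pvIdxs_replicate]
    apply List.map_congr_left
    intro j _
    simp
  have hfin := pvFold_sim password 256 0 (by omega) _ _ hinit
  rw [List.range_eq_range']
  obtain ⟨_, _, hhash, _⟩ := hfin
  simpa using hhash
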